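-- pv_equiv track=rewrite | github.com/lhyysr/Basic-Properties-of-Bitcoin | bitcoin.py | vector2
-- ===== SOURCE A (Python) =====
-- def vector2(v1):
--     v2 = []
--     while (v1 != ''):
--         count = 0
--         while (v1[0] != '1'):
--             count += 1
--             v1 = v1[1:]
--             if (v1 == ''):
--                 return v2
--         v2.append(count)
--         v1 = v1[1:]
--     return v2
-- ===== SOURCE B (Python) =====
-- def vector2(v1):
--     v2 = []
--     count = 0
--     for ch in v1:
--         if ch == '1':
--             v2.append(count)
--             count = 0
--         else:
--             count += 1
--     return v2
-- ===== Notes on version B (the rewrite author's own statement) =====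
-- stated objective: faster
-- what changed: Replaces the nested while loops that repeatedly slice the string (O(n^2)) with a single for-loop over characters keeping a running counter, appending it on each '1'.
import Mathlib
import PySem

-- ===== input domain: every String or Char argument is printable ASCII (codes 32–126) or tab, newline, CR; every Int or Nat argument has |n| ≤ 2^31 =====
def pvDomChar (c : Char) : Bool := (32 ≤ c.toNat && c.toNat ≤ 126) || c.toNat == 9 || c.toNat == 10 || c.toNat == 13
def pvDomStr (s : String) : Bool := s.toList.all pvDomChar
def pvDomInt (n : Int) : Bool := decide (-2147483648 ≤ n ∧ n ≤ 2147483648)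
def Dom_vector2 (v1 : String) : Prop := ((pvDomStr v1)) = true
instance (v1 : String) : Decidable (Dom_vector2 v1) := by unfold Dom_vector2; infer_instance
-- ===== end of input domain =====

-- B replaces A's nested while loops with repeated string slicing by one linear scan with a counter (faster, asymptotic).

-- ===== PORT A =====
-- inner while loop of A: consumes non-'1' chars counting them; returns none on A's early
-- `return v2` (string exhausted), otherwise some (count, remaining string with '1' at head)
def vecInner : List Char → Int → Option (Int × List Char)
  | [], _ => none   -- unreachable: callers pass a nonempty list
  | c :: rest, count =>
    if c = '1' then some (count, c :: rest)
    else if rest = [] then none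
    else vecInner rest (count + 1)

theorem vecInner_some (l : List Char) (count cnt : Int) (l' : List Char)
    (h : vecInner l count = some (cnt, l')) : l'.length ≤ l.length ∧ l' ≠ [] := by
  induction l generalizing count with
  | nil => simp [vecInner] at h
  | cons c rest ih =>
    simp only [vecInner] at h
    split_ifs at h with h1 h2
    · cases h; exact ⟨le_refl _, by simp⟩
    · have := ih (count + 1) h
      exact ⟨Nat.le_succ_of_le this.1, this.2⟩

-- outer while loop of A
def vecOuter (l : List Char) (acc : List Int) : List Int :=
  if hl : l = [] then acc
  else
    match h : vecInner l 0 with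
    | none => acc
    | some (count, l') => vecOuter l'.tail (acc ++ [count])
termination_by l.length
decreasing_by
  have := vecInner_some l 0 count l' h
  have hlen : l'.tail.length = l'.length - 1 := by simp
  have h1 : 1 ≤ l'.length := by
    cases l' with
    | nil => exact absurd rfl this.2
    | cons a b => simp
  omega

def vector2 (v1 : String) : List Int := vecOuter v1.toList []

-- ===== PORT B =====
-- single pass: running counter of non-'1' chars, emitted and reset at each '1'
def vecGo : List Char → Int → List Int
  | [], _ => []
  | c :: rest, count => if c = '1' then count :: vecGo rest 0 else vecGo rest (count + 1)

def vector2_alt (v1 : String) : List Int := vecGo v1.toList 0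

-- ===== PRECONDITION & SPEC =====
def Spec_vector2 (v1 : String) (out : List Int) : Prop := out = vector2_alt v1
instance (v1 : String) (out : List Int) : Decidable (Spec_vector2 v1 out) := by unfold Spec_vector2; infer_instance

-- ===== CLAIM (what is proved, stated in full; the proofs are below) =====
def Claim_equal_vector2 : Prop := ∀ (v1 : String), Dom_vector2 v1 → Spec_vector2 v1 (vector2 v1)

-- ===== LEMMAS AND PROOFS =====

-- one round of A's inner loop plus the emitted count equals B's scan
theorem vecInner_go (l : List Char) (count : Int) :
    (match vecInner l count with
     | none => []
     | some (cnt, l') => cnt :: vecGo l'.tail 0) = vecGo l count := by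
  induction l generalizing count with
  | nil => simp [vecInner, vecGo]
  | cons c rest ih =>
    by_cases h1 : c = '1'
    · simp [vecInner, vecGo, h1]
    · by_cases h2 : rest = []
      · simp [vecInner, vecGo, h1, h2]
      · simp only [vecInner, vecGo, if_neg h1, if_neg h2]
        exact ih (count + 1)

theorem vecOuter_go (n : ℕ) (l : List Char) (acc : List Int) (hn : l.length ≤ n) :
    vecOuter l acc = acc ++ vecGo l 0 := by
  induction n generalizing l acc with
  | zero =>
    have : l = [] := List.length_eq_zero_iff.mp (Nat.le_zero.mp hn)
    subst this; simp [vecOuter, vecGo]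
  | succ n ih =>
    by_cases hl : l = []
    · subst hl; simp [vecOuter, vecGo]
    · rw [vecOuter]
      simp only [dif_neg hl]
      have hgo := vecInner_go l 0
      cases h : vecInner l 0 with
      | none =>
        rw [h] at hgo; simp at hgo
        simp [hgo]
      | some p =>
        obtain ⟨cnt, l'⟩ := p
        rw [h] at hgo
        have hs := vecInner_some l 0 cnt l' h
        have h1 : 1 ≤ l'.length := by
          cases l' with
          | nil => exact absurd rfl hs.2
          | cons a b => simp
        have hle : l'.tail.length ≤ n := by
          have : l'.tail.length = l'.length - 1 := by simp
          have hll : 1 ≤ l.length := by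
            cases l with
            | nil => exact absurd rfl hl
            | cons a b => simp
          omega
        show vecOuter l'.tail (acc ++ [cnt]) = acc ++ vecGo l 0
        rw [ih l'.tail (acc ++ [cnt]) hle]
        simp only at hgo
        rw [← hgo]
        simp

-- ===== VERDICT (by name: the statement is the Claim_ definition above) =====
theorem vector2_spec : Claim_equal_vector2 := by
  intro v1 _
  unfold Spec_vector2 vector2 vector2_alt
  simpa using vecOuter_go v1.toList.length v1.toList [] (le_refl _)
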